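-- pv_equiv track=rewrite | github.com/joeynavarro/numerology | notebooks/modules/reductions_spreads_matches.py | dob_no_calc
-- ===== SOURCE A (Python) =====
-- def dob_no_calc(dob):
--
--         dob_lst = [int(x) for x in str(dob)]
--
--         #define digits from input string
--         lP_no = sum(dob_lst)
--         imp_no = sum([dob_lst[d] for d in range(2, 4)])
--         att_no = sum([dob_lst[d] for d in range(0, 4)])
--
--         #single digit reductions
--         while len(str(lP_no)) > 1:
--             lP_no = sum([int(i) for i in str(lP_no)])
--
--         while len(str(imp_no)) > 1:
--             imp_no = sum([int(i) for i in str(imp_no)])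
--
--         while len(str(att_no)) > 1:
--             att_no = sum([int(i) for i in str(att_no)])
--
--         return [lP_no, imp_no, att_no]
-- ===== SOURCE B (Python) =====
-- def dob_no_calc(dob):
--     d = [int(x) for x in str(dob)]
--
--     # digital root in closed form instead of repeated digit re-summing
--     def dr(n):
--         return 0 if n == 0 else 1 + (n - 1) % 9
--
--     return [dr(sum(d)), dr(d[2] + d[3]), dr(d[0] + d[1] + d[2] + d[3])]
-- ===== Notes on version B (the rewrite author's own statement) =====
-- stated objective: simpler
-- what changed: Replaces the three while-loops that repeatedly re-sum the decimal digits via str() with the closed-form digital root dr(n) = 0 if n == 0 else 1 + (n - 1) % 9 applied once to each of the three digit sums.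
import Mathlib
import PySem

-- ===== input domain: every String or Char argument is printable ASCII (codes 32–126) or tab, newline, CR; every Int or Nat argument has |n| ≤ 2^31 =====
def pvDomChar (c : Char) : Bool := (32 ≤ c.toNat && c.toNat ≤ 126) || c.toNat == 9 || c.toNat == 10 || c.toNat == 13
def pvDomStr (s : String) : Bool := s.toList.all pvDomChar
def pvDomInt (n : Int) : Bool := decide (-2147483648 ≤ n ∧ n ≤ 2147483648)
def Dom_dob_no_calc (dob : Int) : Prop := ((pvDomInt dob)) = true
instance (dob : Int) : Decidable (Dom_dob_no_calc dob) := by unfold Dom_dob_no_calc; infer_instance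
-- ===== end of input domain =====

-- B replaces A's three digit-resumming while-loops by the closed-form digital root 1 + (n-1) % 9.

-- ===== PORT A =====

-- int(x) for a one-character string x; the .getD 0 stands for the ValueError Python raises
-- on a non-digit character (only reachable for dob < 0, which Pre_ excludes).
def pvCharVal (c : Char) : Int := (PySem.Int.ofChars? [c]).getD 0

-- dob_lst = [int(x) for x in str(dob)]
def pvDigits (n : Int) : List Int := (PySem.Int.toStr n).toList.map pvCharVal

-- pure digit-sum function, used only to prove termination of pvReduce below
def pvS (n : Nat) : Nat := if n < 10 then n else n % 10 + pvS (n / 10)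
termination_by n
decreasing_by exact Nat.div_lt_self (by omega) (by omega)

lemma pvS_le (n : Nat) : pvS n ≤ n := by
  induction n using Nat.strong_induction_on with
  | _ n ih =>
    rw [pvS]
    split
    · exact le_rfl
    · rename_i h
      have h10 : 10 ≤ n := by omega
      have := ih (n / 10) (Nat.div_lt_self (by omega) (by omega))
      omega

lemma pvS_lt (n : Nat) (h : 10 ≤ n) : pvS n < n := by
  rw [pvS]
  split
  · omega
  · have h1 := pvS_le (n / 10)
    omega

lemma pvCharVal_digitChar (d : Nat) (h : d < 10) : pvCharVal (Nat.digitChar d) = (d : Int) := by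
  interval_cases d <;> decide

lemma pvSum_toDigitsCore : ∀ (f n : Nat) (l : List Char), n < f →
    ((Nat.toDigitsCore 10 f n l).map pvCharVal).sum = (pvS n : Int) + ((l.map pvCharVal)).sum := by
  intro f
  induction f with
  | zero => intro n l h; omega
  | succ f ih =>
    intro n l h
    rw [Nat.toDigitsCore]
    by_cases h0 : n / 10 = 0
    · have hn : n < 10 := by omega
      simp only [h0, if_true, List.map_cons, List.sum_cons,
        pvCharVal_digitChar (n % 10) (Nat.mod_lt _ (by omega))]
      rw [pvS]
      simp only [hn, if_true]
      omega
    · simp only [h0, if_false]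
      rw [ih (n / 10) _ (by omega)]
      simp only [List.map_cons, List.sum_cons,
        pvCharVal_digitChar (n % 10) (Nat.mod_lt _ (by omega))]
      have hn : ¬ n < 10 := by omega
      conv_rhs => rw [pvS, if_neg hn]
      push_cast
      ring

lemma pvDigits_sum (n : Int) : (pvDigits n).sum = (pvS n.natAbs : Int) := by
  unfold pvDigits
  rw [PySem.Int.toList_toStr]
  unfold PySem.Int.toChars
  by_cases hn : n < 0
  · simp only [hn, if_true, Nat.toDigits, List.map_cons, List.sum_cons]
    rw [pvSum_toDigitsCore (n.natAbs + 1) n.natAbs [] (by omega)]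
    have hminus : (PySem.Int.ofChars? ['-']).getD 0 = 0 := by decide
    simp [pvCharVal, hminus]
  · simp only [hn, if_false, Nat.toDigits]
    rw [pvSum_toDigitsCore (n.toNat + 1) n.toNat [] (by omega)]
    have : n.toNat = n.natAbs := by omega
    simp [this]

lemma pvToDigits_lt10 (m : Nat) (h : m < 10) : Nat.toDigits 10 m = [Nat.digitChar m] := by
  rw [Nat.toDigits, Nat.toDigitsCore]
  simp [Nat.div_eq_of_lt h, Nat.mod_eq_of_lt h]

lemma pvLen_toChars_cast (m : Nat) (h : 1 < (PySem.Int.toChars (m : Int)).length) : 10 ≤ m := by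
  by_contra hlt
  have : (m : Int).toNat = m := by omega
  simp only [PySem.Int.toChars, show ¬ ((m : Int) < 0) by omega, if_false, this,
    pvToDigits_lt10 m (by omega), List.length_cons, List.length_nil] at h
  omega

-- A's while-loop: while len(str(n)) > 1: n = sum(int(i) for i in str(n))
def pvReduce (n : Int) : Int :=
  if 1 < PySem.Str.len (PySem.Int.toStr n) then pvReduce (pvDigits n).sum else n
termination_by (if n < 0 then n.natAbs + 1 else n.toNat)
decreasing_by
  rename_i h
  rw [PySem.Str.len_eq, PySem.Int.toList_toStr] at h
  rw [pvDigits_sum n]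
  have hS0 : ¬ ((pvS n.natAbs : Int) < 0) := by omega
  simp only [hS0, if_false, Int.toNat_natCast]
  by_cases hn : n < 0
  · simp only [hn, if_true]
    have := pvS_le n.natAbs
    omega
  · simp only [hn, if_false]
    have hm : 10 ≤ n.natAbs := by
      apply pvLen_toChars_cast n.natAbs
      have : ((n.natAbs : Int)) = n := by omega
      rw [this]
      exact_mod_cast h
    have := pvS_lt n.natAbs hm
    omega

def dob_no_calc (dob : Int) : List Int :=
  let dob_lst := pvDigits dob
  let lP_no := dob_lst.sum
  let imp_no := ((PySem.List.pyRange 2 4 1).map (fun d => (PySem.List.pyGet? dob_lst d).getD 0)).sum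
  let att_no := ((PySem.List.pyRange 0 4 1).map (fun d => (PySem.List.pyGet? dob_lst d).getD 0)).sum
  [pvReduce lP_no, pvReduce imp_no, pvReduce att_no]

-- ===== PORT B =====

-- dr(n) = 0 if n == 0 else 1 + (n - 1) % 9
def pvDr (n : Int) : Int := if n = 0 then 0 else 1 + PySem.Int.mod (n - 1) 9

def dob_no_calc_alt (dob : Int) : List Int :=
  let d := pvDigits dob
  [pvDr d.sum,
   pvDr ((PySem.List.pyGet? d 2).getD 0 + (PySem.List.pyGet? d 3).getD 0),
   pvDr ((PySem.List.pyGet? d 0).getD 0 + (PySem.List.pyGet? d 1).getD 0 +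
         (PySem.List.pyGet? d 2).getD 0 + (PySem.List.pyGet? d 3).getD 0)]

-- ===== PRECONDITION & SPEC =====
-- A returns normally exactly when dob has at least four decimal digits: on a negative dob it
-- raises ValueError (int of the '-' character), and on a shorter nonnegative dob it raises
-- IndexError (dob_lst[d] for d up to 3).
def Pre_dob_no_calc (dob : Int) : Prop := 1000 ≤ dob
instance (dob : Int) : Decidable (Pre_dob_no_calc dob) := by unfold Pre_dob_no_calc; infer_instance
def pvWitness_dob_no_calc : Int := (1990)

def Spec_dob_no_calc (dob : Int) (out : List Int) : Prop := out = dob_no_calc_alt dob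
instance (dob : Int) (out : List Int) : Decidable (Spec_dob_no_calc dob out) := by unfold Spec_dob_no_calc; infer_instance

-- ===== CLAIM (what is proved, stated in full; the proofs are below) =====
def Claim_equal_dob_no_calc : Prop := ∀ (dob : Int), Dom_dob_no_calc dob → Pre_dob_no_calc dob → Spec_dob_no_calc dob (dob_no_calc dob)

-- ===== LEMMAS AND PROOFS =====
lemma pvCharVal_digitChar_nonneg (d : Nat) (h : d < 10) : 0 ≤ pvCharVal (Nat.digitChar d) := by
  rw [pvCharVal_digitChar d h]; exact Int.natCast_nonneg d

lemma pvLen_toDigitsCore_ge : ∀ (f n : Nat) (l : List Char),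
    l.length ≤ (Nat.toDigitsCore 10 f n l).length := by
  intro f
  induction f with
  | zero => intro n l; rw [Nat.toDigitsCore]
  | succ f ih =>
    intro n l
    rw [Nat.toDigitsCore]
    by_cases h0 : n / 10 = 0
    · simp [h0]
    · simp only [h0, if_false]
      calc l.length ≤ (Nat.digitChar (n % 10) :: l).length := by simp
        _ ≤ _ := ih _ _

lemma pvLen_toDigitsCore_succ (f n : Nat) (l : List Char) (hf : 0 < f) :
    l.length + 1 ≤ (Nat.toDigitsCore 10 f n l).length := by
  cases f with
  | zero => omega
  | succ f =>
    rw [Nat.toDigitsCore]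
    by_cases h0 : n / 10 = 0
    · simp [h0]
    · simp only [h0, if_false]
      calc l.length + 1 = (Nat.digitChar (n % 10) :: l).length := by simp
        _ ≤ _ := pvLen_toDigitsCore_ge f (n / 10) _



lemma pvS_mod9 (n : Nat) : pvS n % 9 = n % 9 := by
  induction n using Nat.strong_induction_on with
  | _ n ih =>
    rw [pvS]
    split
    · rfl
    · rename_i h
      have h10 : 10 ≤ n := by omega
      have ihd := ih (n / 10) (Nat.div_lt_self (by omega) (by omega))
      have hdm : n = 10 * (n / 10) + n % 10 := (Nat.div_add_mod' n 10).symm ▸ by omega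
      omega

lemma pvS_pos (n : Nat) (h : 1 ≤ n) : 1 ≤ pvS n := by
  induction n using Nat.strong_induction_on with
  | _ n ih =>
    rw [pvS]
    split
    · omega
    · rename_i hn
      have := pvS_mod9 n
      -- if pvS n = 0 then n % 9 = 0; argue via the sum form instead: n % 10 + pvS (n/10) ≥ 1
      by_cases h0 : n % 10 = 0
      · have : 1 ≤ n / 10 := by omega
        have := ih (n / 10) (Nat.div_lt_self (by omega) (by omega)) this
        omega
      · omega

lemma pvReduce_eq_dr_nat (m : Nat) : pvReduce (m : Int) = pvDr (m : Int) := by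
  induction m using Nat.strong_induction_on with
  | _ m ih =>
    rw [pvReduce, PySem.Str.len_eq, PySem.Int.toList_toStr]
    by_cases hm : 10 ≤ m
    · have hlen : 1 < ((PySem.Int.toChars (m : Int)).length : Int) := by
        have h2 : 2 ≤ (Nat.toDigits 10 m).length := by
          rw [Nat.toDigits, Nat.toDigitsCore]
          have h0 : ¬ (m / 10 = 0) := by omega
          simp only [h0, if_false]
          have := pvLen_toDigitsCore_succ m (m / 10) [Nat.digitChar (m % 10)] (by omega)
          simpa using this
        have : PySem.Int.toChars (m : Int) = Nat.toDigits 10 m := by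
          simp [PySem.Int.toChars, show ¬ ((m : Int) < 0) by omega, show (m : Int).toNat = m by omega]
        rw [this]
        exact_mod_cast by omega
      simp only [hlen, if_true]
      rw [pvDigits_sum, show ((m : Int)).natAbs = m by omega]
      rw [ih (pvS m) (pvS_lt m hm)]
      -- pvDr (pvS m) = pvDr m
      have h9 : (pvS m : Int) % 9 = (m : Int) % 9 := by
        have := pvS_mod9 m; omega
      have hp : 1 ≤ pvS m := pvS_pos m (by omega)
      unfold pvDr
      rw [PySem.Int.mod_eq_emod_of_pos (by omega), PySem.Int.mod_eq_emod_of_pos (by omega)]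
      have h1 : ¬ ((pvS m : Int) = 0) := by omega
      have h2 : ¬ ((m : Int) = 0) := by omega
      simp only [h1, h2, if_false]
      omega
    · have hlen : ¬ (1 < ((PySem.Int.toChars (m : Int)).length : Int)) := by
        intro hc
        exact absurd (pvLen_toChars_cast m (by exact_mod_cast hc)) hm
      simp only [hlen, if_false]
      unfold pvDr
      rw [PySem.Int.mod_eq_emod_of_pos (by omega)]
      by_cases h0 : (m : Int) = 0
      · simp [h0]
      · simp only [h0, if_false]
        omega

lemma pvReduce_eq_dr (s : Int) (hs : 0 ≤ s) : pvReduce s = pvDr s := by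
  have := pvReduce_eq_dr_nat s.toNat
  rwa [Int.toNat_of_nonneg hs] at this

lemma pvDigits_mem_nonneg (dob : Int) (h : 0 ≤ dob) : ∀ x ∈ pvDigits dob, 0 ≤ x := by
  unfold pvDigits
  rw [PySem.Int.toList_toStr]
  have : PySem.Int.toChars dob = Nat.toDigits 10 dob.toNat := by
    simp [PySem.Int.toChars, show ¬ (dob < 0) by omega]
  rw [this, Nat.toDigits]
  intro x hx
  rw [List.mem_map] at hx
  obtain ⟨c, hc, rfl⟩ := hx
  have key : ∀ (f n : Nat) (l : List Char), (∀ c ∈ l, 0 ≤ pvCharVal c) →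
      ∀ c ∈ Nat.toDigitsCore 10 f n l, 0 ≤ pvCharVal c := by
    intro f
    induction f with
    | zero => intro n l hl; rw [Nat.toDigitsCore]; exact hl
    | succ f ih =>
      intro n l hl c hc
      rw [Nat.toDigitsCore] at hc
      by_cases h0 : n / 10 = 0
      · simp only [h0, if_true] at hc
        rcases List.mem_cons.mp hc with rfl | hmem
        · exact pvCharVal_digitChar_nonneg _ (Nat.mod_lt _ (by omega))
        · exact hl _ hmem
      · simp only [h0, if_false] at hc
        refine ih (n / 10) _ ?_ c hc
        intro c' hc'
        rcases List.mem_cons.mp hc' with rfl | hmem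
        · exact pvCharVal_digitChar_nonneg _ (Nat.mod_lt _ (by omega))
        · exact hl _ hmem
  exact key _ _ [] (by simp) c hc

lemma pvGetD_nonneg (dob : Int) (h : 0 ≤ dob) (i : Int) :
    0 ≤ (PySem.List.pyGet? (pvDigits dob) i).getD 0 := by
  cases hg : PySem.List.pyGet? (pvDigits dob) i with
  | none => simp
  | some x =>
    simpa using pvDigits_mem_nonneg dob h x (PySem.List.mem_of_pyGet?_eq_some _ hg)

-- ===== VERDICT (by name: the statement is the Claim_ definition above) =====
theorem dob_no_calc_spec : Claim_equal_dob_no_calc := by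
  intro dob _ hpre
  unfold Spec_dob_no_calc dob_no_calc dob_no_calc_alt
  have hd : (0 : Int) ≤ dob := by unfold Pre_dob_no_calc at hpre; omega
  have hrange2 : PySem.List.pyRange 2 4 1 = [2, 3] := by decide
  have hrange0 : PySem.List.pyRange 0 4 1 = [0, 1, 2, 3] := by decide
  simp only [hrange2, hrange0, List.map_cons, List.map_nil, List.sum_cons, List.sum_nil, add_zero]
  have hg := pvGetD_nonneg dob hd
  have hsum : (0 : Int) ≤ (pvDigits dob).sum :=
    List.sum_nonneg (pvDigits_mem_nonneg dob hd)
  rw [pvReduce_eq_dr _ hsum,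
      pvReduce_eq_dr _ (by have := hg 2; have := hg 3; omega),
      pvReduce_eq_dr _ (by have := hg 0; have := hg 1; have := hg 2; have := hg 3; omega)]
  ring_nf
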